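-- pv_equiv track=rewrite | github.com/kartikaykhosla-web/GA-audit | bulk_audit_worker.py | select_primary_execution_event
-- ===== SOURCE A (Python) =====
-- from typing import Any, Dict, List, Optional
--
-- def normalize_event_name(name: str) -> str:
--     text = str(name or "").strip()
--     return "page_view" if text in {"pageview", "page_view"} else text
--
-- def select_primary_execution_event(ga_events: List[dict]) -> Optional[dict]:
--     if not ga_events:
--         return None
--     preferred_names = ("page_view", "pageview")
--     preferred_sources = ("seleniumwire", "performance_log", "probe_sendBeacon", "probe_fetch", "probe_xhr", "probe_image", "gtag")
--     for event_name in preferred_names: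
--         for source in preferred_sources:
--             for event in ga_events:
--                 if normalize_event_name(event.get("event_name") or "") == event_name and str(event.get("source") or "") == source:
--                     return event
--         for event in ga_events:
--             if normalize_event_name(event.get("event_name") or "") == event_name:
--                 return event
--     return ga_events[0]
-- ===== SOURCE B (Python) =====
-- def normalize_event_name(name: str) -> str:
--     text = str(name or "").strip()
--     return "page_view" if text in {"pageview", "page_view"} else text
--
-- def select_primary_execution_event(ga_events):
--     if not ga_events:
--         return None
--     preferred_sources = ("seleniumwire", "performance_log", "probe_sendBeacon", "probe_fetch", "probe_xhr", "probe_image", "gtag")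
--     best = None
--     best_rank = None
--     for event in ga_events:
--         if normalize_event_name(event.get("event_name") or "") != "page_view":
--             continue
--         source = str(event.get("source") or "")
--         rank = preferred_sources.index(source) if source in preferred_sources else len(preferred_sources)
--         if best_rank is None or rank < best_rank:
--             best, best_rank = event, rank
--     return best if best is not None else ga_events[0]
-- ===== Notes on version B (the rewrite author's own statement) =====
-- stated objective: simpler
-- what changed: A's three nested scans (2 preferred names x 7 preferred sources x events, plus per-name fallback scans) are replaced by a single pass over ga_events keeping the first event with minimal source-priority rank (index in preferred_sources, 7 if absent), with the same ga_events[0] fallback; A's dead 'pageview' outer iteration (normalization never yields 'pageview') is dropped.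
import Mathlib
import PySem

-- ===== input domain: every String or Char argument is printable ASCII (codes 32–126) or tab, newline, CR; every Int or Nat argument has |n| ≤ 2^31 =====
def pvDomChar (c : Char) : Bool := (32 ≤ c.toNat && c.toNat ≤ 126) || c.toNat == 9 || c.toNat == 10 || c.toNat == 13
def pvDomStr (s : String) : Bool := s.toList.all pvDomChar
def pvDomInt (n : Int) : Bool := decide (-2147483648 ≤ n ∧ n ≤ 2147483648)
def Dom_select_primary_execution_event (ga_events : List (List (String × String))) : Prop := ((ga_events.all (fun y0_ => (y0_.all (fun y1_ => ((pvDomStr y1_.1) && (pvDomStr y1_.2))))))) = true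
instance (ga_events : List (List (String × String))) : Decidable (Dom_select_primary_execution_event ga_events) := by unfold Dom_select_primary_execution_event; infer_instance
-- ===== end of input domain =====

-- B replaces A's three nested scans (2 names × 7 sources × events, plus fallback scans) by a
-- single pass keeping the first event of minimal source-priority rank (objective: simpler).

abbrev pvEv := List (String × String)

-- dict.get(k): association-list lookup, first match
def pvGet (ev : pvEv) (k : String) : Option String :=
  (ev.find? (fun p => p.1 == k)).map (·.2)

-- `event.get(k) or ""`: missing key and empty string both give "" (values are strings)
def pvField (ev : pvEv) (k : String) : String :=
  (pvGet ev k).getD ""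

-- `str(name or "").strip()` is `name.strip()` for a string argument (falsy str is only "")
def normalize_event_name (name : String) : String :=
  let text := PySem.Str.strip name
  if text = "pageview" ∨ text = "page_view" then "page_view" else text

def pvSources : List String :=
  ["seleniumwire", "performance_log", "probe_sendBeacon", "probe_fetch", "probe_xhr", "probe_image", "gtag"]

-- ===== PORT A =====
-- early-return for-loop: first `some` produced by g along L (A's `for …: if …: return` shape)
def pvLoopFind (g : String → Option pvEv) (L : List String) : Option pvEv :=
  L.foldl (fun acc source =>
    match acc with
    | some e => some e
    | none => g source) none

def select_primary_execution_event (ga_events : List (List (String × String))) : Option (List (String × String)) :=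
  if ga_events = [] then none
  else
    match pvLoopFind (fun event_name =>
        match pvLoopFind (fun source => ga_events.find? (fun event =>
            normalize_event_name (pvField event "event_name") == event_name
              && pvField event "source" == source)) pvSources with
        | some e => some e
        | none => ga_events.find? (fun event =>
            normalize_event_name (pvField event "event_name") == event_name))
        ["page_view", "pageview"] with
    | some e => some e
    | none => PySem.List.pyGet? ga_events 0

-- ===== PORT B =====
-- rank of an event: position of its source in pvSources, else len(pvSources)
def pvRank (event : pvEv) : Nat :=
  match PySem.List.index? pvSources (pvField event "source") with
  | some i => i
  | none => pvSources.length

-- body of B's single loop (r is the rank function; B uses pvRank)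
def pvStep (r : pvEv → Nat) (best : Option (pvEv × Nat)) (event : pvEv) : Option (pvEv × Nat) :=
  if normalize_event_name (pvField event "event_name") ≠ "page_view" then best
  else
    let rank := r event
    match best with
    | none => some (event, rank)
    | some (_, best_rank) => if rank < best_rank then some (event, rank) else best

def select_primary_execution_event_alt (ga_events : List (List (String × String))) : Option (List (String × String)) :=
  if ga_events = [] then none
  else
    match ga_events.foldl (pvStep pvRank) none with
    | some (e, _) => some e
    | none => PySem.List.pyGet? ga_events 0

-- ===== PRECONDITION & SPEC =====
def Spec_select_primary_execution_event (ga_events : List (List (String × String))) (out : Option (List (String × String))) : Prop := out = select_primary_execution_event_alt ga_events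
instance (ga_events : List (List (String × String))) (out : Option (List (String × String))) : Decidable (Spec_select_primary_execution_event ga_events out) := by unfold Spec_select_primary_execution_event; infer_instance

-- ===== CLAIM (what is proved, stated in full; the proofs are below) =====
def Claim_equal_select_primary_execution_event : Prop := ∀ (ga_events : List (List (String × String))), Dom_select_primary_execution_event ga_events → Spec_select_primary_execution_event ga_events (select_primary_execution_event ga_events)

-- ===== LEMMAS AND PROOFS =====

-- eligibility test shared by both sides
def pvNameOK (ev : pvEv) : Bool := normalize_event_name (pvField ev "event_name") == "page_view"
def pvSrc (ev : pvEv) : String := pvField ev "source"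

-- rank relative to an arbitrary source list (pvRank = pvRankOf pvSources)
def pvRankOf (L : List String) (ev : pvEv) : Nat :=
  match PySem.List.index? L (pvSrc ev) with
  | some i => i
  | none => L.length

-- "first some" of g over a list (A's early-return source loop)
def pvFS (g : String → Option pvEv) : List String → Option pvEv
  | [] => none
  | s :: L => match g s with | some e => some e | none => pvFS g L

-- combine an already-found best with the best of the rest (strict-min, first wins)
def pvComb (a t : Option (pvEv × Nat)) : Option (pvEv × Nat) :=
  match a, t with
  | none, t => t
  | some p, none => some p
  | some (b, br), some (e, m) => if m < br then some (e, m) else some (b, br)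

theorem pvFS_none (g : String → Option pvEv) (L : List String) (h : ∀ s, g s = none) :
    pvFS g L = none := by
  induction L with
  | nil => rfl
  | cons s L ih => simp [pvFS, h, ih]

theorem pvLoopFind_eq (g : String → Option pvEv) (L : List String) :
    pvLoopFind g L = pvFS g L := by
  unfold pvLoopFind
  suffices h : ∀ acc, L.foldl (fun acc source =>
      match acc with | some e => some e | none => g source) acc
      = match acc with | some e => some e | none => pvFS g L from h none
  induction L with
  | nil => intro acc; cases acc <;> simp [pvFS]
  | cons s L ih =>
    intro acc
    cases acc with
    | some e => simp [List.foldl, ih]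
    | none =>
      simp only [List.foldl]
      rw [ih]
      cases h : g s <;> simp [h, pvFS]

theorem pvStep_comb (r : pvEv → Nat) (acc t : Option (pvEv × Nat)) (x : pvEv) :
    pvComb (pvStep r acc x) t = pvComb acc (pvComb (pvStep r none x) t) := by
  rcases acc with _ | ⟨b, br⟩ <;> rcases t with _ | ⟨e, m⟩ <;>
    by_cases h : normalize_event_name (pvField x "event_name") = "page_view" <;>
    simp only [pvStep, pvComb, h, ne_eq, not_true_eq_false, not_false_eq_true, if_true,
      if_false] <;>
    repeat' split_ifs <;> first | rfl | (exfalso; omega) | simp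

theorem pv_foldl_comb (r : pvEv → Nat) (xs : List pvEv) (acc : Option (pvEv × Nat)) :
    xs.foldl (pvStep r) acc = pvComb acc (xs.foldl (pvStep r) none) := by
  induction xs generalizing acc with
  | nil => rcases acc with _ | ⟨b, br⟩ <;> rfl
  | cons x xs ih =>
    simp only [List.foldl]
    rw [ih (pvStep r acc x), ih (pvStep r none x), pvStep_comb]

theorem pvStep_pos (r : pvEv → Nat) (x : pvEv)
    (hn : normalize_event_name (pvField x "event_name") = "page_view") :
    pvStep r none x = some (x, r x) := by
  simp [pvStep, hn]

theorem pvStep_neg (r : pvEv → Nat) (acc : Option (pvEv × Nat)) (x : pvEv)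
    (hn : ¬ normalize_event_name (pvField x "event_name") = "page_view") :
    pvStep r acc x = acc := by
  simp [pvStep, hn]

theorem pvComb_none_left (t : Option (pvEv × Nat)) : pvComb none t = t := rfl

theorem pv_foldl_zero (r : pvEv → Nat) (hr : ∀ ev, r ev = 0) (xs : List pvEv) :
    xs.foldl (pvStep r) none = (xs.find? pvNameOK).map (fun e => (e, 0)) := by
  induction xs with
  | nil => rfl
  | cons x xs ih =>
    rw [List.foldl_cons, pv_foldl_comb, ih]
    by_cases h : normalize_event_name (pvField x "event_name") = "page_view"
    · have hx : pvNameOK x = true := by simp [pvNameOK, h]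
      rw [List.find?_cons_of_pos hx, pvStep_pos r x h, hr x]
      cases hfs : xs.find? pvNameOK <;> simp [pvComb]
    · have hx : ¬ (pvNameOK x = true) := by simp [pvNameOK, h]
      rw [List.find?_cons_of_neg hx, pvStep_neg r none x h, pvComb_none_left]

theorem pv_foldl_found (r : pvEv → Nat) (s : String)
    (hr : ∀ ev, pvNameOK ev = true → (r ev = 0 ↔ pvSrc ev = s)) (xs : List pvEv) (e : pvEv)
    (hf : xs.find? (fun ev => pvNameOK ev && (pvSrc ev == s)) = some e) :
    xs.foldl (pvStep r) none = some (e, 0) := by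
  induction xs with
  | nil => simp at hf
  | cons x xs ih =>
    rw [List.foldl_cons, pv_foldl_comb]
    rw [List.find?_cons] at hf
    by_cases hn : normalize_event_name (pvField x "event_name") = "page_view"
    · have hx : pvNameOK x = true := by simp [pvNameOK, hn]
      by_cases hs : pvSrc x = s
      · simp only [hx, hs] at hf
        simp at hf
        subst hf
        have h0 : r x = 0 := (hr x hx).2 hs
        rw [pvStep_pos r x hn, h0]
        cases hfs : xs.foldl (pvStep r) none with
        | none => rfl
        | some p => rcases p with ⟨e', m'⟩; simp [pvComb]
      · simp only [hx] at hf
        have hsb : (pvSrc x == s) = false := by simp [hs]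
        simp only [hsb, Bool.and_false] at hf
        have hrest := ih hf
        have hne : r x ≠ 0 := fun h0 => hs ((hr x hx).1 h0)
        rw [pvStep_pos r x hn, hrest]
        have hpos : 0 < r x := Nat.pos_of_ne_zero hne
        simp [pvComb, hpos]
    · have hx : pvNameOK x = false := by simp [pvNameOK, hn]
      simp only [hx, Bool.false_and] at hf
      rw [pvStep_neg r none x hn, pvComb_none_left]
      exact ih hf

theorem pvComb_shift (a t : Option (pvEv × Nat)) :
    (pvComb a t).map (fun p => (p.1, p.2 + 1))
      = pvComb (a.map (fun p => (p.1, p.2 + 1))) (t.map (fun p => (p.1, p.2 + 1))) := by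
  rcases a with _ | ⟨b, br⟩ <;> rcases t with _ | ⟨e, m⟩ <;> simp [pvComb] <;>
    split_ifs <;> simp

theorem pv_foldl_shift (r1 r2 : pvEv → Nat) (xs : List pvEv)
    (h : ∀ ev ∈ xs, pvNameOK ev = true → r1 ev = r2 ev + 1) :
    xs.foldl (pvStep r1) none = (xs.foldl (pvStep r2) none).map (fun p => (p.1, p.2 + 1)) := by
  induction xs with
  | nil => rfl
  | cons x xs ih =>
    rw [List.foldl_cons, pv_foldl_comb, List.foldl_cons, pv_foldl_comb r2]
    rw [ih (fun ev hev => h ev (List.mem_cons_of_mem x hev))]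
    by_cases hn : normalize_event_name (pvField x "event_name") = "page_view"
    · have hx : pvNameOK x = true := by simp [pvNameOK, hn]
      have h1 : r1 x = r2 x + 1 := h x (List.mem_cons_self) hx
      rw [pvStep_pos r1 x hn, pvStep_pos r2 x hn, h1]
      have hmap : (some (x, r2 x + 1) : Option (pvEv × Nat))
          = Option.map (fun p => (p.1, p.2 + 1)) (some (x, r2 x)) := rfl
      rw [hmap, ← pvComb_shift]
    · rw [pvStep_neg r1 none x hn, pvStep_neg r2 none x hn, pvComb_none_left, pvComb_none_left]

theorem pvRankOf_nil (ev : pvEv) : pvRankOf [] ev = 0 := by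
  simp [pvRankOf, PySem.List.index?]

theorem pvRankOf_cons (s : String) (L : List String) (ev : pvEv) :
    pvRankOf (s :: L) ev = if pvSrc ev = s then 0 else pvRankOf L ev + 1 := by
  by_cases h : pvSrc ev = s
  · rw [if_pos h]
    unfold pvRankOf
    rw [h, PySem.List.index?_cons_self]
  · rw [if_neg h]
    unfold pvRankOf
    have hne : s ≠ pvSrc ev := fun hs => h hs.symm
    rw [PySem.List.index?_cons_of_ne L hne]
    cases hi : PySem.List.index? L (pvSrc ev) <;> simp

theorem pv_main (L : List String) (xs : List pvEv) :
    (match pvFS (fun s => xs.find? (fun ev => pvNameOK ev && (pvSrc ev == s))) L with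
     | some e => some e
     | none => xs.find? pvNameOK)
      = (xs.foldl (pvStep (pvRankOf L)) none).map Prod.fst := by
  induction L with
  | nil =>
    rw [pv_foldl_zero (pvRankOf []) pvRankOf_nil]
    cases h : xs.find? pvNameOK <;> simp [pvFS]
  | cons s L ih =>
    cases hf : xs.find? (fun ev => pvNameOK ev && (pvSrc ev == s)) with
    | some e =>
      have hfound := pv_foldl_found (pvRankOf (s :: L)) s
        (fun ev _ => by rw [pvRankOf_cons]; split_ifs with h <;> simp [h]) xs e hf
      simp [pvFS, hf, hfound]
    | none =>
      have hnone : ∀ ev ∈ xs, pvNameOK ev = true → pvSrc ev ≠ s := by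
        intro ev hev hok hs
        have := List.find?_eq_none.mp hf ev hev
        simp [hok, hs] at this
      have hshift : xs.foldl (pvStep (pvRankOf (s :: L))) none
          = (xs.foldl (pvStep (pvRankOf L)) none).map (fun p => (p.1, p.2 + 1)) := by
        apply pv_foldl_shift
        intro ev hev hok
        rw [pvRankOf_cons, if_neg (hnone ev hev hok)]
      rw [hshift]
      simp only [pvFS, hf]
      rw [ih]
      cases h2 : xs.foldl (pvStep (pvRankOf L)) none <;> simp

theorem pv_never_pageview (name : String) :
    (normalize_event_name name == "pageview") = false := by
  simp only [normalize_event_name]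
  split_ifs with h
  · decide
  · simp only [beq_eq_false_iff_ne, ne_eq]
    intro hc
    exact h (Or.inl hc)

-- ===== VERDICT (by name: the statement is the Claim_ definition above) =====
theorem select_primary_execution_event_spec : Claim_equal_select_primary_execution_event := by
  intro xs _hdom
  unfold Spec_select_primary_execution_event
  by_cases hxs : xs = []
  · subst hxs; rfl
  · simp only [select_primary_execution_event, select_primary_execution_event_alt, if_neg hxs]
    simp only [pvLoopFind_eq, pvFS]
    have hgpv : pvFS (fun source => xs.find? (fun event =>
        normalize_event_name (pvField event "event_name") == "pageview"
          && pvField event "source" == source)) pvSources = none := by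
      apply pvFS_none
      intro s
      apply List.find?_eq_none.mpr
      intro ev _
      simp [pv_never_pageview]
    have hfpv : xs.find? (fun event =>
        normalize_event_name (pvField event "event_name") == "pageview") = none := by
      apply List.find?_eq_none.mpr
      intro ev _
      simp [pv_never_pageview]
    rw [hgpv, hfpv]
    have hmain := pv_main pvSources xs
    simp only [pvNameOK, pvSrc] at hmain
    have hrank : pvStep (pvRankOf pvSources) = pvStep pvRank := rfl
    rw [hrank] at hmain
    cases h1 : pvFS (fun s => xs.find? fun ev =>
        (normalize_event_name (pvField ev "event_name") == "page_view")
          && (pvField ev "source" == s)) pvSources with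
    | some e =>
      rw [h1] at hmain
      cases hF : xs.foldl (pvStep pvRank) none with
      | none => rw [hF] at hmain; simp at hmain
      | some p =>
        rcases p with ⟨e2, m⟩
        rw [hF] at hmain
        simp at hmain
        subst hmain
        simp
    | none =>
      rw [h1] at hmain
      have hm2 : List.find? (fun event =>
          normalize_event_name (pvField event "event_name") == "page_view") xs
          = Option.map Prod.fst (List.foldl (pvStep pvRank) none xs) := hmain
      cases hF : xs.foldl (pvStep pvRank) none with
      | none =>
        rw [hF] at hm2
        simp only [Option.map_none] at hm2
        simp [hm2]
      | some p =>
        rcases p with ⟨e2, m⟩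
        rw [hF] at hm2
        simp only [Option.map_some] at hm2
        simp [hm2]
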